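-- pv_equiv track=rewrite | github.com/EFord36/normalise | normalise/splitter.py | mixedcase_split
-- ===== SOURCE A (Python) =====
-- def mixedcase_split(nsw):
--     """ Split tokens on transitions from upper- to lower- or lower- to
--     upper-case.
--     """
--     try:
--         if nsw.isalpha():
--             if nsw.istitle():
--                 return [nsw]
--             else:
--                 out = []
--                 ind = 0
--                 if nsw[0].isupper():
--                     cat = 'up'
--                 else:
--                     cat = 'low'
--                 for i in range(1, len(nsw)):
--                     if nsw[i].isupper():
--                         if cat == 'up':
--                             pass
--                         else:
--                             out.append(nsw[ind:i])
--                             cat = 'up'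
--                             ind = i
--                     else:
--                         if cat == 'low':
--                             pass
--                         elif nsw[i - 1].isupper():
--                             cat = 'low'
--                             pass
--                         else:
--                             out.append(nsw[ind:i])
--                             cat = 'low'
--                             ind = i
--                 out.append(nsw[ind:])
--                 return out
--         else:
--             return [nsw]
--     except(KeyboardInterrupt, SystemExit):
--         raise
--     except:
--         return nsw
-- ===== SOURCE B (Python) =====
-- def mixedcase_split(nsw):
--     """Split tokens on transitions from upper- to lower- or lower- to
--     upper-case (two-pass: collect cut indices, then slice)."""
--     try:
--         if not nsw.isalpha():
--             return [nsw]
--         n = len(nsw)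
--         cuts = [i for i in range(1, n)
--                 if nsw[i].isupper() and not nsw[i - 1].isupper()]
--         bounds = [0] + cuts + [n]
--         return [nsw[a:b] for a, b in zip(bounds, bounds[1:])]
--     except (KeyboardInterrupt, SystemExit):
--         raise
--     except:
--         return nsw
-- ===== Notes on version B (the rewrite author's own statement) =====
-- stated objective: alternative
-- what changed: A's one-pass state machine (category 'up'/'low' with an istitle special case) is replaced by two passes: first collect every boundary index i with nsw[i].isupper() and not nsw[i-1].isupper(), then slice nsw between consecutive boundaries via zip; the istitle branch is dropped because the split already yields [nsw] for title-case words.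
import Mathlib
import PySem

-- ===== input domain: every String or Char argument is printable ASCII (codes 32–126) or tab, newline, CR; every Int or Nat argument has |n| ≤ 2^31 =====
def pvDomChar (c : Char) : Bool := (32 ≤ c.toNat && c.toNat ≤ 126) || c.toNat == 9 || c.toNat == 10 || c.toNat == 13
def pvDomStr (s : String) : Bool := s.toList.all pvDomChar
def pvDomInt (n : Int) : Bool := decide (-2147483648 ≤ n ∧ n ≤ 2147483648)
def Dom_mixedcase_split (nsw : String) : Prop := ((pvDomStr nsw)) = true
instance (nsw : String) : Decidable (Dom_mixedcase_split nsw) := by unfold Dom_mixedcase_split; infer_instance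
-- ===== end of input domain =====

-- B replaces A's one-pass case-transition state machine (and its istitle special case) by two
-- passes: collect the cut indices, then slice between consecutive boundaries (objective: alternative).

-- ===== PORT A =====
-- hand port of str.istitle, exact on ASCII (ASCII has no titlecase characters);
-- args: remaining chars, previous-char-cased?, any-cased-seen?
def pvIstitle : List Char → Bool → Bool → Bool
  | [], _, found => found
  | c :: t, prev, found =>
    if PySem.Chars.isupper c then
      if prev then false else pvIstitle t true true
    else if PySem.Chars.islower c then
      if !prev then false else pvIstitle t true true
    else pvIstitle t false found

-- one iteration of A's for-loop; state (out, ind, cat), cat = true means cat == 'up'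
def pvStepA (cs : List Char) (st : List (List Char) × Nat × Bool) (i : Nat) :
    List (List Char) × Nat × Bool :=
  let (out, ind, cat) := st
  if PySem.Chars.isupper (cs.getD i ' ') then
    if cat then (out, ind, cat)
    else (out ++ [PySem.List.slice cs (some (ind : Int)) (some (i : Int))], i, true)
  else
    if !cat then (out, ind, cat)
    else if PySem.Chars.isupper (cs.getD (i - 1) ' ') then (out, ind, false)
    else (out ++ [PySem.List.slice cs (some (ind : Int)) (some (i : Int))], i, false)

def mixedcase_split (nsw : String) : List String :=
  let cs := nsw.toList
  if PySem.Chars.strIsalpha cs then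
    if pvIstitle cs false false then [nsw]
    else
      let st := (List.range' 1 (cs.length - 1)).foldl (pvStepA cs)
        ([], 0, PySem.Chars.isupper (cs.getD 0 ' '))
      (st.1 ++ [cs.drop st.2.1]).map String.ofList
  else [nsw]


-- ===== PORT B =====
-- nsw[i].isupper() and not nsw[i-1].isupper()
def pvCutPred (cs : List Char) (i : Nat) : Bool :=
  PySem.Chars.isupper (cs.getD i ' ') && !PySem.Chars.isupper (cs.getD (i - 1) ' ')

def mixedcase_split_alt (nsw : String) : List String :=
  let cs := nsw.toList
  if !PySem.Chars.strIsalpha cs then [nsw]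
  else
    let cuts := (List.range' 1 (cs.length - 1)).filter (pvCutPred cs)
    let bounds := 0 :: (cuts ++ [cs.length])
    (bounds.zip bounds.tail).map (fun ab =>
      String.ofList (PySem.List.slice cs (some (ab.1 : Int)) (some (ab.2 : Int))))

-- ===== PRECONDITION & SPEC =====
def Spec_mixedcase_split (nsw : String) (out : List String) : Prop := out = mixedcase_split_alt nsw
instance (nsw : String) (out : List String) : Decidable (Spec_mixedcase_split nsw out) := by unfold Spec_mixedcase_split; infer_instance

-- ===== CLAIM (what is proved, stated in full; the proofs are below) =====
def Claim_equal_mixedcase_split : Prop := ∀ (nsw : String), Dom_mixedcase_split nsw → Spec_mixedcase_split nsw (mixedcase_split nsw)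

-- ===== LEMMAS AND PROOFS =====

-- the cut indices of B among 1..k
def pvCuts (cs : List Char) (k : Nat) : List Nat :=
  (List.range' 1 k).filter (pvCutPred cs)

theorem pvZip_tail_concat (bs : List Nat) (x : Nat) (h : bs ≠ []) :
    (bs ++ [x]).zip ((bs ++ [x]).tail) = bs.zip bs.tail ++ [(bs.getLast h, x)] := by
  induction bs with
  | nil => simp at h
  | cons a t ih =>
    cases t with
    | nil => simp
    | cons b t' =>
      show (a, b) :: ((b :: t' ++ [x]).zip ((b :: t' ++ [x]).tail)) = _
      rw [ih (by simp)]
      simp [List.getLast_cons]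

theorem pvZip0 (l : List Nat) (x : Nat) :
    (0 :: (l ++ [x])).zip (l ++ [x])
      = (0 :: l).zip l ++ [((0 :: l).getLast (List.cons_ne_nil _ _), x)] := by
  simpa using pvZip_tail_concat (0 :: l) x (List.cons_ne_nil _ _)

theorem pvGetLast0 (l : List Nat) (x : Nat) :
    (0 :: (l ++ [x])).getLast (List.cons_ne_nil _ _) = x := by
  simpa using List.getLast_concat (l := 0 :: l) (a := x)

theorem pvLoop_inv (cs : List Char) (k : Nat) :
    (List.range' 1 k).foldl (pvStepA cs) ([], 0, PySem.Chars.isupper (cs.getD 0 ' '))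
      = (((0 :: pvCuts cs k).zip (pvCuts cs k)).map
           (fun ab => PySem.List.slice cs (some (ab.1 : Int)) (some (ab.2 : Int))),
         (0 :: pvCuts cs k).getLast (List.cons_ne_nil _ _),
         PySem.Chars.isupper (cs.getD k ' ')) := by
  induction k with
  | zero => rfl
  | succ k ih =>
    have h1k : (1 : Nat) + k = k + 1 := Nat.add_comm 1 k
    rw [List.range'_1_concat, List.foldl_concat, ih, h1k]
    have hcuts : pvCuts cs (k + 1)
        = pvCuts cs k ++ (if pvCutPred cs (k + 1) then [k + 1] else []) := by
      unfold pvCuts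
      rw [List.range'_1_concat, h1k, List.filter_append]
      cases h : pvCutPred cs (k + 1) <;> simp [h]
    have hsub : (k + 1) - 1 = k := by omega
    cases hu : PySem.Chars.isupper (cs.getD (k + 1) ' ') with
    | true =>
      cases hc : PySem.Chars.isupper (cs.getD k ' ') with
      | true =>
        have hp : pvCutPred cs (k + 1) = false := by
          simp only [pvCutPred, hsub, hc, Bool.not_true, Bool.and_false]
        simp only [pvStepA, hu, hc, if_true, hcuts, hp, Bool.false_eq_true, if_false,
          List.append_nil]
      | false =>
        have hp : pvCutPred cs (k + 1) = true := by
          simp only [pvCutPred, hsub, hu, hc, Bool.not_false, Bool.and_self]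
        simp only [pvStepA, hu, hc, if_true, Bool.false_eq_true, if_false, hcuts, hp,
          pvZip0, pvGetLast0, List.map_append, List.map_cons, List.map_nil]
    | false =>
      have hp : pvCutPred cs (k + 1) = false := by simp only [pvCutPred, hu, Bool.false_and]
      cases hc : PySem.Chars.isupper (cs.getD k ' ') with
      | true =>
        simp only [pvStepA, hu, hc, hsub, hcuts, hp, Bool.false_eq_true, if_false,
          Bool.not_true, if_true, List.append_nil]
      | false =>
        simp only [pvStepA, hu, hc, hsub, hcuts, hp, Bool.false_eq_true, if_false,
          Bool.not_false, if_true, List.append_nil]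

theorem pvIstitle_tail_not_upper (t : List Char) (ha : t.all PySem.Chars.isalpha = true)
    (b : Bool) (h : pvIstitle t true b = true) :
    t.all (fun c => !PySem.Chars.isupper c) = true := by
  induction t generalizing b with
  | nil => simp
  | cons c t ih =>
    simp only [List.all_cons, Bool.and_eq_true] at ha ⊢
    unfold pvIstitle at h
    cases hu : PySem.Chars.isupper c with
    | true => simp [hu] at h
    | false =>
      have hl : PySem.Chars.islower c = true := by
        have := ha.1; simp [PySem.Chars.isalpha, hu] at this; exact this
      simp only [hu, Bool.false_eq_true, if_false, hl, if_true, Bool.not_true] at h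
      exact ⟨by simp [hu], ih ha.2 true h⟩

theorem pvTitle_cuts_nil (cs : List Char) (hall : cs.all PySem.Chars.isalpha = true)
    (hne : cs ≠ []) (ht : pvIstitle cs false false = true) :
    pvCuts cs (cs.length - 1) = [] := by
  obtain ⟨c, t, rfl⟩ := List.exists_cons_of_ne_nil hne
  have htail : t.all (fun c => !PySem.Chars.isupper c) = true := by
    unfold pvIstitle at ht
    cases hu : PySem.Chars.isupper c with
    | true =>
      simp only [hu, if_true, Bool.not_false, Bool.false_eq_true, if_false] at ht
      have hta : t.all PySem.Chars.isalpha = true := by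
        simp only [List.all_cons, Bool.and_eq_true] at hall; exact hall.2
      exact pvIstitle_tail_not_upper t hta true ht
    | false =>
      exfalso
      have hl : PySem.Chars.islower c = true := by
        simp only [List.all_cons, Bool.and_eq_true] at hall
        have := hall.1
        simp [PySem.Chars.isalpha, hu] at this; exact this
      simp [hu, hl] at ht
  apply List.filter_eq_nil_iff.mpr
  intro i hi
  rw [List.mem_range'_1] at hi
  have hi1 : 1 ≤ i := hi.1
  have hjlt : i - 1 < t.length := by
    have := hi.2; simp at this; omega
  have hmem : (c :: t).getD i ' ' = t.getD (i - 1) ' ' := by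
    obtain ⟨j, rfl⟩ : ∃ j, i = j + 1 := ⟨i - 1, by omega⟩
    simp [List.getD_cons_succ]
  have hup : PySem.Chars.isupper ((c :: t).getD i ' ') = false := by
    rw [hmem, List.getD_eq_getElem t ' ' hjlt]
    have := List.all_eq_true.mp htail _ (List.getElem_mem hjlt)
    simpa using this
  simp only [pvCutPred, hup, Bool.false_and, Bool.false_eq_true, not_false_eq_true]

theorem pvDropSlice (cs : List Char) (g n : Nat) (h : cs.length ≤ n) :
    PySem.List.slice cs (some (g : Int)) (some (n : Int)) = cs.drop g := by
  rw [PySem.List.slice_natCast]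
  exact List.take_of_length_le (by simp; omega)

theorem pvMain (nsw : String) : mixedcase_split nsw = mixedcase_split_alt nsw := by
  unfold mixedcase_split mixedcase_split_alt
  cases ha : PySem.Chars.strIsalpha nsw.toList with
  | false => simp only [ha, Bool.false_eq_true, if_false, Bool.not_false, if_true]
  | true =>
    simp only [ha, if_true, Bool.not_true, Bool.false_eq_true, if_false]
    have hne : nsw.toList ≠ [] := by
      simp only [PySem.Chars.strIsalpha, Bool.and_eq_true] at ha
      simpa [List.isEmpty_iff] using ha.1
    have hall : nsw.toList.all PySem.Chars.isalpha = true := by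
      simp only [PySem.Chars.strIsalpha, Bool.and_eq_true] at ha
      exact ha.2
    have hofl : String.ofList nsw.toList = nsw := by simp
    -- fold B's filter into pvCuts
    rw [show (List.range' 1 (nsw.toList.length - 1)).filter (pvCutPred nsw.toList)
          = pvCuts nsw.toList (nsw.toList.length - 1) from rfl]
    cases ht : pvIstitle nsw.toList false false with
    | true =>
      rw [if_pos rfl, pvTitle_cuts_nil nsw.toList hall hne ht]
      simp only [List.nil_append, List.tail_cons, List.zip_cons_cons, List.zip_nil_right,
        List.map_cons, List.map_nil, Nat.cast_zero]
      rw [PySem.List.slice_zero_start, PySem.List.slice_to_natCast, List.take_length, hofl]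
    | false =>
      rw [if_neg (by simp), pvLoop_inv nsw.toList (nsw.toList.length - 1)]
      simp only [List.tail_cons]
      rw [pvZip0]
      simp only [List.map_append, List.map_cons, List.map_nil, List.map_map, Function.comp_def]
      rw [pvDropSlice _ _ _ (by simp)]

-- ===== VERDICT (by name: the statement is the Claim_ definition above) =====
theorem mixedcase_split_spec : Claim_equal_mixedcase_split := by
  intro nsw _
  unfold Spec_mixedcase_split
  exact pvMain nsw
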